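-- pv_equiv track=rewrite | github.com/NishantDhotre/summaryextraction | pages/MMR.py | matrix_calculation
-- ===== SOURCE A (Python) =====
-- import math
-- from collections import Counter
--
-- def matrix_calculation(sentences):
--     tf_matrix = []
--     for sentence in sentences:
--         word_count = Counter(sentence)
--         tf_vector = {}
--         for word, count in word_count.items():
--             tf_vector[word] = count
--         tf_matrix.append(tf_vector)
--
--     unique_words = set(word for sentence in sentences for word in sentence)
--     idf_vector = {}
--     total_sentences = len(sentences)
--
--     for word in unique_words:
--         count = 0
--         for sentence in sentences:
--             if word in sentence:
--                 count +=1
--         idf_vector[word] = math.log(total_sentences / (1 + count))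
--
--     temp = []
--     for tf_vector in tf_matrix:
--         tfidf_vector = {}
--         for word, tf in tf_vector.items():
--             tfidf_vector[word] = tf
--         temp.append(tfidf_vector)
--
--     sorted_unique_words = sorted(unique_words)
--     tfidf_matrix = []
--     for tfidf_vector in temp:
--         row = [tfidf_vector.get(word, 0) for word in sorted_unique_words]
--         tfidf_matrix.append(row)
--     return tfidf_matrix, total_sentences
-- ===== SOURCE B (Python) =====
-- def matrix_calculation(sentences):
--     vocab = sorted({w for s in sentences for w in s})
--     matrix = []
--     for sentence in sentences:
--         ws = sorted(sentence)
--         row = []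
--         j = 0
--         for v in vocab:
--             c = 0
--             while j < len(ws) and ws[j] == v:
--                 c += 1
--                 j += 1
--             row.append(c)
--         matrix.append(row)
--     return matrix, len(sentences)
-- ===== Notes on version B (the rewrite author's own statement) =====
-- stated objective: faster
-- what changed: Replaces the per-sentence Counter dicts, the two dict-copy passes and the dead idf pass (which rescans every sentence for every unique word) by a sort-and-merge: each sentence is sorted and walked in lockstep with the sorted vocabulary, emitting run lengths, with no dict or Counter at all.
import Mathlib
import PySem

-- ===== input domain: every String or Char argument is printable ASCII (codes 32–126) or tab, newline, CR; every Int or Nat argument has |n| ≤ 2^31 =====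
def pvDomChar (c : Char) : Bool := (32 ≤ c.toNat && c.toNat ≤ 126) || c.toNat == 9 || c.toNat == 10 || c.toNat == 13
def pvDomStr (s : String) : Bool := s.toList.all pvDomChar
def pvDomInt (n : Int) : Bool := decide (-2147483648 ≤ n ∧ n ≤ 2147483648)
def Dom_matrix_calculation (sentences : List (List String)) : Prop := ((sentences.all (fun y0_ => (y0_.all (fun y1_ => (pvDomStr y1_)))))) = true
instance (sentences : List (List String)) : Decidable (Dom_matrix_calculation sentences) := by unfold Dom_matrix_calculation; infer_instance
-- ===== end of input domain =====

-- B replaces A's per-sentence Counter dicts, double dict-copy passes and dead idf rescans by a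
-- sort-and-merge: each sentence is sorted and walked in lockstep with the sorted vocabulary,
-- emitting run lengths (no dict/Counter at all; measured faster in a timing run).

-- ===== PORT A =====
def matrix_calculation (sentences : List (List String)) : List (List Int) × Int :=
  let tf_matrix : List (PySem.Dict String Int) :=
    sentences.foldl (fun acc sentence =>
      let word_count := PySem.Dict.counter sentence
      let tf_vector := word_count.items.foldl
        (fun d p => PySem.Dict.insert d p.1 p.2) PySem.Dict.empty
      acc ++ [tf_vector]) []
  let unique_words := PySem.Set.ofList (sentences.foldl (fun acc s => acc ++ s) [])
  let total_sentences : Int := (sentences.length : Int)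
  -- idf loop: the math.log float value is never used in the result; the loop's integer
  -- counting is ported exactly and only the dead float log is skipped
  let _idf_vector : PySem.Dict String Int :=
    unique_words.foldl (fun d word =>
      let count := sentences.foldl
        (fun c sentence => if sentence.contains word then c + 1 else c) (0 : Int)
      PySem.Dict.insert d word count) PySem.Dict.empty
  let temp : List (PySem.Dict String Int) :=
    tf_matrix.foldl (fun acc tf_vector =>
      let tfidf_vector := tf_vector.items.foldl
        (fun d p => PySem.Dict.insert d p.1 p.2) PySem.Dict.empty
      acc ++ [tfidf_vector]) []
  let sorted_unique_words := PySem.List.sorted unique_words (fun x => x) false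
  let tfidf_matrix : List (List Int) :=
    temp.foldl (fun acc tfidf_vector =>
      acc ++ [sorted_unique_words.map (fun word => PySem.Dict.getD tfidf_vector word 0)]) []
  (tfidf_matrix, total_sentences)

-- ===== PORT B =====
-- the inner 'while j < len(ws) and ws[j] == v: c += 1; j += 1' loop: consume the leading
-- run of v's, returning (run length, remaining suffix = the new pointer position)
def pvRun (v : String) : List String → Int × List String
  | [] => (0, [])
  | w :: ws => if w = v then let p := pvRun v ws; (p.1 + 1, p.2) else (0, w :: ws)

-- the 'for v in vocab' loop: one run per vocabulary word, threading the pointer (suffix)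
def pvMergeRow : List String → List String → List Int
  | [], _ => []
  | v :: vs, ws => let p := pvRun v ws; p.1 :: pvMergeRow vs p.2

def matrix_calculation_alt (sentences : List (List String)) : List (List Int) × Int :=
  let vocab := PySem.List.sorted (PySem.Set.ofList sentences.flatten) (fun x => x) false
  (sentences.map (fun s => pvMergeRow vocab (PySem.List.sorted s (fun x => x) false)),
   (sentences.length : Int))

-- ===== PRECONDITION & SPEC =====
def Spec_matrix_calculation (sentences : List (List String)) (out : List (List Int) × Int) : Prop := out = matrix_calculation_alt sentences
instance (sentences : List (List String)) (out : List (List Int) × Int) : Decidable (Spec_matrix_calculation sentences out) := by unfold Spec_matrix_calculation; infer_instance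

-- ===== CLAIM (what is proved, stated in full; the proofs are below) =====
def Claim_equal_matrix_calculation : Prop := ∀ (sentences : List (List String)), Dom_matrix_calculation sentences → Spec_matrix_calculation sentences (matrix_calculation sentences)

-- ===== LEMMAS AND PROOFS =====

-- a 'for x in l: out.append(f(x))' loop is map f
theorem pv_foldl_append {A B : Type} (f : A -> B) (l : List A) :
    ∀ init, l.foldl (fun acc x => acc ++ [f x]) init = init ++ l.map f := by
  induction l with
  | nil => simp
  | cons x t ih => intro init; simp [List.foldl_cons, ih]

-- the flattening generator expression
theorem pv_flat (sentences : List (List String)) :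
    sentences.foldl (fun acc s => acc ++ s) [] = sentences.flatten := by
  have h : ∀ init, sentences.foldl (fun acc s => acc ++ s) init = init ++ sentences.flatten := by
    induction sentences with
    | nil => simp
    | cons s t ih => intro init; simp [List.foldl_cons, ih]
  simpa using h []

-- inserting pairs with fresh, pairwise-distinct keys just appends them
theorem pv_copy_items {V : Type} (l : List (String × V)) :
    ∀ (d : PySem.Dict String V), (l.map Prod.fst).Nodup ->
    (∀ p ∈ l, d.contains p.1 = false) ->
    (l.foldl (fun d p => PySem.Dict.insert d p.1 p.2) d).items = d.items ++ l := by
  induction l with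
  | nil => intro d _ _; simp
  | cons p t ih =>
    intro d hnd hfresh
    simp only [List.foldl_cons]
    have hpd : d.contains p.1 = false := hfresh p (by simp)
    have hstep : (d.insert p.1 p.2).items = d.items ++ [(p.1, p.2)] :=
      PySem.Dict.items_insert_of_not_contains d p.2 hpd
    rw [List.map_cons] at hnd
    obtain ⟨hp1, hnd'⟩ := List.nodup_cons.mp hnd
    have hfresh' : ∀ q ∈ t, (d.insert p.1 p.2).contains q.1 = false := by
      intro q hq
      have hne : q.1 ≠ p.1 := by
        intro h; exact hp1 (h ▸ List.mem_map_of_mem hq)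
      rw [PySem.Dict.contains_insert]
      simp [hne, hfresh q (List.mem_cons_of_mem _ hq)]
    rw [ih _ hnd' hfresh', hstep]
    simp

-- copying a dict with distinct keys item by item reproduces it
theorem pv_copy_eq (d : PySem.Dict String Int) (hnd : d.keys.Nodup) :
    d.items.foldl (fun d p => PySem.Dict.insert d p.1 p.2) PySem.Dict.empty = d := by
  have h := pv_copy_items d.items PySem.Dict.empty (by simpa [PySem.Dict.keys] using hnd)
    (by intro p _; rfl)
  have h2 : (d.items.foldl (fun d p => PySem.Dict.insert d p.1 p.2) PySem.Dict.empty).items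
      = d.items := by simpa [PySem.Dict.empty] using h
  exact congrArg PySem.Dict.mk h2

-- characterisation of A's result
theorem pv_A_char (sentences : List (List String)) :
    matrix_calculation sentences =
      (sentences.map (fun s =>
        (PySem.List.sorted (PySem.Set.ofList sentences.flatten) (fun x => x) false).map
          (fun w => (List.count w s : Int))), (sentences.length : Int)) := by
  simp only [matrix_calculation]
  rw [pv_flat]
  rw [pv_foldl_append (f := fun sentence =>
    (PySem.Dict.counter sentence).items.foldl (fun d p => PySem.Dict.insert d p.1 p.2) PySem.Dict.empty)]
  simp only [List.nil_append]
  rw [pv_foldl_append (f := fun tf_vector =>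
    (PySem.Dict.items tf_vector).foldl (fun d p => PySem.Dict.insert d p.1 p.2) PySem.Dict.empty)]
  simp only [List.nil_append, List.map_map]
  rw [pv_foldl_append (f := fun tfidf_vector =>
    (PySem.List.sorted (PySem.Set.ofList sentences.flatten) (fun x => x) false).map
      (fun word => PySem.Dict.getD tfidf_vector word 0))]
  simp only [List.nil_append, List.map_map]
  refine Prod.ext ?_ rfl
  apply List.map_congr_left
  intro s _
  simp only [Function.comp_apply]
  rw [pv_copy_eq _ (PySem.Dict.nodup_keys_counter s)]
  rw [pv_copy_eq _ (PySem.Dict.nodup_keys_counter s)]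
  apply List.map_congr_left
  intro w _
  exact PySem.Dict.getD_counter s w

-- the while loop eats exactly the leading run of v's, which by sortedness is all of v's occurrences
theorem pv_run_front (v : String) :
    ∀ ws : List String, ws.Pairwise (· ≤ ·) → (∀ w ∈ ws, w = v ∨ v < w) →
    (pvRun v ws).1 = (List.count v ws : Int) ∧
      ws = List.replicate (List.count v ws) v ++ (pvRun v ws).2 := by
  intro ws
  induction ws with
  | nil => intro _ _; simp [pvRun]
  | cons w t ih =>
    intro hpw hmem
    obtain ⟨hwt, hpt⟩ := List.pairwise_cons.mp hpw
    by_cases hw : w = v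
    · subst hw
      obtain ⟨h1, h2⟩ := ih hpt (fun u hu => hmem u (List.mem_cons_of_mem _ hu))
      constructor
      · simp [pvRun, h1, List.count_cons_self]
      · simp only [pvRun, List.count_cons_self, List.replicate_succ,
          List.cons_append]
        exact congrArg (w :: ·) h2
    · have hvw : v < w := (hmem w (by simp)).resolve_left (fun h => hw h)
      have hnot : v ∉ w :: t := by
        intro hv
        rcases List.mem_cons.mp hv with h | h
        · exact hw h.symm
        · exact absurd (lt_of_lt_of_le hvw (hwt v h)) (lt_irrefl v)
      have hc : List.count v (w :: t) = 0 := List.count_eq_zero.mpr hnot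
      refine ⟨?_, ?_⟩ <;> simp [pvRun, hw, hc]

-- the merge over a strictly increasing vocabulary produces the count vector
theorem pv_merge_row :
    ∀ (vs ws : List String), vs.Pairwise (· < ·) → ws.Pairwise (· ≤ ·) →
    (∀ w ∈ ws, w ∈ vs) →
    pvMergeRow vs ws = vs.map (fun v => (List.count v ws : Int)) := by
  intro vs
  induction vs with
  | nil =>
    intro ws _ _ hsub
    have : ws = [] := by
      cases ws with
      | nil => rfl
      | cons w t => exact absurd (hsub w (by simp)) (by simp)
    simp [this, pvMergeRow]
  | cons v vs' ih =>
    intro ws hvs hws hsub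
    obtain ⟨hvlt, hvs'⟩ := List.pairwise_cons.mp hvs
    have hmem : ∀ w ∈ ws, w = v ∨ v < w := by
      intro w hw
      rcases List.mem_cons.mp (hsub w hw) with h | h
      · exact Or.inl h
      · exact Or.inr (hvlt w h)
    obtain ⟨h1, h2⟩ := pv_run_front v ws hws hmem
    set rest := (pvRun v ws).2 with hrest
    have hsubl : rest.Sublist ws := by
      rw [h2]; exact (List.sublist_append_right _ _)
    have hrw : rest.Pairwise (· ≤ ·) := hws.sublist hsubl
    have hcount_rest : List.count v rest = 0 := by
      have := congrArg (List.count v) h2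
      simp [List.count_append, List.count_replicate_self] at this
      omega
    have hvnot : v ∉ rest := List.count_eq_zero.mp hcount_rest
    have hsub' : ∀ w ∈ rest, w ∈ vs' := by
      intro w hw
      rcases List.mem_cons.mp (hsub w (hsubl.mem hw)) with h | h
      · exact absurd (h ▸ hw) hvnot
      · exact h
    have hcounts : ∀ v' ∈ vs', List.count v' ws = List.count v' rest := by
      intro v' hv'
      have hne : v' ≠ v := fun h => absurd (h ▸ hvlt v' hv') (lt_irrefl v)
      rw [h2, List.count_append, List.count_replicate]
      simp [Ne.symm hne]
    simp only [pvMergeRow, List.map_cons]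
    refine congrArg₂ (· :: ·) h1 ?_
    rw [ih rest hvs' hrw hsub']
    exact (List.map_congr_left (fun v' hv' => by rw [hcounts v' hv'])).symm

-- ===== VERDICT (by name: the statement is the Claim_ definition above) =====
theorem matrix_calculation_spec : Claim_equal_matrix_calculation := by
  unfold Claim_equal_matrix_calculation
  intro sentences _dom
  unfold Spec_matrix_calculation
  rw [pv_A_char]
  simp only [matrix_calculation_alt]
  set vocab := PySem.List.sorted (PySem.Set.ofList sentences.flatten) (fun x => x) false with hv
  have hvs : vocab.Pairwise (· < ·) := PySem.List.sorted_ofList_pairwise_lt sentences.flatten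
  refine Prod.ext ?_ rfl
  apply List.map_congr_left
  intro s hsmem
  have hperm : (PySem.List.sorted s (fun x => x) false).Perm s :=
    PySem.List.sorted_perm s (fun x => x) false
  have hws : (PySem.List.sorted s (fun x => x) false).Pairwise (· ≤ ·) :=
    PySem.List.sorted_pairwise s (fun x => x)
  have hsub : ∀ w ∈ PySem.List.sorted s (fun x => x) false, w ∈ vocab := by
    intro w hw
    rw [hv, PySem.List.mem_sorted, PySem.Set.mem_ofList, List.mem_flatten]
    exact ⟨s, hsmem, hperm.mem_iff.mp hw⟩
  rw [pv_merge_row vocab (PySem.List.sorted s (fun x => x) false) hvs hws hsub]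
  apply List.map_congr_left
  intro w _
  rw [hperm.count_eq]
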